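-- pv_equiv track=rewrite | github.com/ddmin/CodeSnippets | PY/Exercises/python_graded_labs.py | highest_n_scores
-- ===== SOURCE A (Python) =====
-- def highest_n_scores(scores, n = 5):
-- 	player_dict = {}
-- 	for score in scores:
-- 		player, points = score
-- 		player_dict.setdefault(player, [])
-- 		player_dict[player].append(points)
--
-- 	output = []
-- 	for player, score in player_dict.items():
-- 		output.append((player, sum(sorted(score, reverse=True)[:n])))
-- 	return output
-- ===== SOURCE B (Python) =====
-- def _insert(top, x):
--     # return a new ascending list with x inserted after all elements <= x
--     i = 0
--     while i < len(top) and top[i] <= x: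
--         i += 1
--     return top[:i] + [x] + top[i:]
--
--
-- def _bump(top, x, n):
--     # top holds (ascending) the best scores seen so far, at most n of them
--     if len(top) < n:
--         return _insert(top, x)
--     if top and x > top[0]:
--         return _insert(top[1:], x)
--     return top
--
--
-- def highest_n_scores(scores, n=5):
--     best = {}
--     for player, points in scores:
--         best[player] = _bump(best.get(player, []), points, n)
--     return [(player, sum(top)) for player, top in best.items()]
-- ===== Notes on version B (the rewrite author's own statement) =====
-- stated objective: alternative
-- what changed: Instead of storing every score per player and sorting each list at the end, B keeps per player only a bounded ascending list of the current top-n scores, updated by insert/evict in one pass, so no final sort is needed.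
-- outside the precondition, e.g. on highest_n_scores([('a', 1), ('a', 2)], -1): A returns [('a', 2)], B returns [('a', 0)]
import Mathlib
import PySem

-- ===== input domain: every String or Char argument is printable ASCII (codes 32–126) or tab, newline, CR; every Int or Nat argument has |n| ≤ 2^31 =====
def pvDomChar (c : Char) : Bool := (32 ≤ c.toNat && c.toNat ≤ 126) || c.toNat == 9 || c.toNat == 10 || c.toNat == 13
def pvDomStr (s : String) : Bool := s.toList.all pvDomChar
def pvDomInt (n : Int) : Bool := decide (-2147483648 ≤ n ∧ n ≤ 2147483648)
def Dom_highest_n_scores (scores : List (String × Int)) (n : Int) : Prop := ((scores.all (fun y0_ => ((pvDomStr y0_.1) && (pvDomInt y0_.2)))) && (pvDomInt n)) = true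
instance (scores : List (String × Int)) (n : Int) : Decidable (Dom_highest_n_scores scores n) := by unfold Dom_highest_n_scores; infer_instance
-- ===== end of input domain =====

-- B groups scores per player while maintaining only a bounded ascending list of the
-- current top-n scores (one pass, no final sort); objective: alternative data structure.

-- ===== PORT A =====
def highest_n_scores (scores : List (String × Int)) (n : Int) : List (String × Int) :=
  let player_dict := scores.foldl
    (fun d score => (d.setdefault score.1 []).modify score.1 [] (fun v => v ++ [score.2]))
    PySem.Dict.empty
  player_dict.items.foldl
    (fun output p =>
      output ++ [(p.1, (PySem.List.slice (PySem.List.sorted p.2 (fun s => s) true) none (some n)).sum)])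
    []

-- ===== PORT B =====
-- _insert: new ascending list with x inserted after all elements ≤ x
def bIns (x : Int) : List Int → List Int
  | [] => [x]
  | a :: t => if a ≤ x then a :: bIns x t else x :: a :: t

-- _bump: keep at most n best scores (ascending); drop the smallest when full
def bump (top : List Int) (x n : Int) : List Int :=
  if (top.length : Int) < n then bIns x top
  else match top with
    | [] => top
    | a :: t => if a < x then bIns x t else top

def highest_n_scores_alt (scores : List (String × Int)) (n : Int) : List (String × Int) :=
  let best := scores.foldl
    (fun d p => d.insert p.1 (bump (d.getD p.1 []) p.2 n)) PySem.Dict.empty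
  best.items.map (fun p => (p.1, p.2.sum))

-- ===== PRECONDITION & SPEC =====
-- Pre_ restricts to n ≥ 0, the natural domain of a 'top n' count: for n < 0 A's slice
-- sorted(...)[:n] accidentally keeps all but the |n| smallest scores, a slicing artefact
-- outside the task's domain, while B's bounded structure keeps no scores there.
def Pre_highest_n_scores (scores : List (String × Int)) (n : Int) : Prop := 0 ≤ n
instance (scores : List (String × Int)) (n : Int) : Decidable (Pre_highest_n_scores scores n) := by unfold Pre_highest_n_scores; infer_instance
def pvWitness_highest_n_scores : (List (String × Int)) × Int := ([("ann", 3), ("bob", 5), ("ann", 7), ("ann", 2)], 2)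

def Spec_highest_n_scores (scores : List (String × Int)) (n : Int) (out : List (String × Int)) : Prop := out = highest_n_scores_alt scores n
instance (scores : List (String × Int)) (n : Int) (out : List (String × Int)) : Decidable (Spec_highest_n_scores scores n out) := by unfold Spec_highest_n_scores; infer_instance

-- ===== CLAIM (what is proved, stated in full; the proofs are below) =====
def Claim_equal_highest_n_scores : Prop := ∀ (scores : List (String × Int)) (n : Int), Dom_highest_n_scores scores n → Pre_highest_n_scores scores n → Spec_highest_n_scores scores n (highest_n_scores scores n)

-- ===== LEMMAS AND PROOFS =====

theorem bIns_perm (x : Int) : ∀ w : List Int, (bIns x w).Perm (x :: w)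
  | [] => by simp [bIns]
  | a :: t => by
    simp only [bIns]
    split
    · exact ((bIns_perm x t).cons a).trans (List.Perm.swap x a t)
    · exact List.Perm.refl _

theorem bIns_length (x : Int) (w : List Int) : (bIns x w).length = w.length + 1 := by
  simpa using (bIns_perm x w).length_eq

theorem bIns_pairwise (x : Int) : ∀ w : List Int, w.Pairwise (· ≤ ·) → (bIns x w).Pairwise (· ≤ ·)
  | [], _ => by simp [bIns]
  | a :: t, h => by
    rcases List.pairwise_cons.mp h with ⟨ha, ht⟩
    by_cases hax : a ≤ x
    · simp only [bIns, if_pos hax]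
      refine List.pairwise_cons.mpr ⟨?_, bIns_pairwise x t ht⟩
      intro y hy
      rcases List.mem_cons.mp ((bIns_perm x t).mem_iff.mp hy) with rfl | h'
      · omega
      · exact ha y h'
    · simp only [bIns, if_neg hax]
      refine List.pairwise_cons.mpr ⟨?_, h⟩
      intro y hy
      rcases List.mem_cons.mp hy with rfl | h'
      · omega
      · exact le_trans (by omega) (ha y h')

theorem bIns_all_ge (x : Int) : ∀ t : List Int, (∀ y ∈ t, x ≤ y) → bIns x t = x :: t
  | [], _ => by simp [bIns]
  | a :: t, h => by
    have hxa : x ≤ a := h a (by simp)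
    by_cases hax : a ≤ x
    · have hax' : a = x := le_antisymm hax hxa
      subst hax'
      simp only [bIns, if_pos le_rfl]
      rw [bIns_all_ge a t (fun y hy => h y (by simp [hy]))]
    · simp [bIns, hax]

theorem sortA_append (v : List Int) (x : Int) :
    PySem.List.sorted (v ++ [x]) (fun s => s) false = bIns x (PySem.List.sorted v (fun s => s) false) := by
  refine List.Perm.eq_of_pairwise (le := (· ≤ ·)) (fun a b _ _ h1 h2 => le_antisymm h1 h2) ?_ ?_ ?_
  · exact PySem.List.sorted_pairwise (v ++ [x]) (fun s => s)
  · exact bIns_pairwise x _ (PySem.List.sorted_pairwise v (fun s => s))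
  · exact ((PySem.List.sorted_perm _ _ _).trans
      ((List.perm_append_singleton x v).trans
        (List.Perm.cons x (PySem.List.sorted_perm v _ _)).symm)).trans (bIns_perm x _).symm

theorem sortD_eq_reverse (v : List Int) :
    PySem.List.sorted v (fun s => s) true = (PySem.List.sorted v (fun s => s) false).reverse := by
  refine List.Perm.eq_of_pairwise (le := fun a b : Int => b ≤ a) (fun a b _ _ h1 h2 => le_antisymm h2 h1) ?_ ?_ ?_
  · exact PySem.List.sorted_pairwise_rev v (fun s => s)
  · exact List.pairwise_reverse.mpr (PySem.List.sorted_pairwise v (fun s => s))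
  · exact ((PySem.List.sorted_perm _ _ _).trans
      (PySem.List.sorted_perm v _ _).symm).trans (List.reverse_perm _).symm

theorem stepDrop (n x : Int) (hn : 0 ≤ n) :
    ∀ w : List Int, w.Pairwise (· ≤ ·) →
      bump (w.drop (w.length - n.toNat)) x n = (bIns x w).drop (w.length + 1 - n.toNat)
  | [], _ => by
    by_cases h : (0 : Int) < n
    · have hm : 1 ≤ n.toNat := by omega
      simp [bump, bIns, h, Nat.sub_eq_zero_of_le hm]
    · have hm : n.toNat = 0 := by omega
      simp [bump, bIns, h, hm]
  | b :: t, hsort => by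
    have ha : ∀ y ∈ t, b ≤ y := (List.pairwise_cons.mp hsort).1
    have ht : t.Pairwise (· ≤ ·) := (List.pairwise_cons.mp hsort).2
    have hnn : ((n.toNat : Int)) = n := Int.toNat_of_nonneg hn
    by_cases hk : t.length + 1 < n.toNat
    · -- still below capacity: everything is kept and inserted
      have h1 : (b :: t).length - n.toNat = 0 := by simp; omega
      have h2 : (b :: t).length + 1 - n.toNat = 0 := by simp; omega
      have h3 : ((b :: t).length : Int) < n := by simp; omega
      rw [h1, h2, List.drop_zero, List.drop_zero, bump.eq_def, if_pos h3]
    · by_cases hm0 : n.toNat = 0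
      · -- n = 0: nothing is ever kept
        have h1 : (b :: t).length - n.toNat = (b :: t).length := by omega
        have h2 : ¬ (((List.drop (b :: t).length (b :: t)).length : Int) < n) := by
          simp [List.drop_length]; omega
        rw [h1, List.drop_length, bump.eq_def]
        rw [if_neg (by simpa using h2)]
        have : (b :: t).length + 1 - n.toNat = (bIns x (b :: t)).length := by
          rw [bIns_length]; omega
        rw [this, List.drop_length]
      · -- at capacity: n.toNat ≥ 1, t.length + 1 ≥ n.toNat
        by_cases hbx : b ≤ x
        · by_cases hkm : t.length + 1 = n.toNat
          · -- exactly full list kept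
            have h1 : (b :: t).length - n.toNat = 0 := by simp; omega
            have h2 : (b :: t).length + 1 - n.toNat = 1 := by simp; omega
            rw [h1, List.drop_zero, h2]
            have hfull : ¬ (((b :: t).length : Int) < n) := by simp; omega
            rw [bump.eq_def, if_neg hfull]
            simp only [bIns, if_pos hbx, List.drop_succ_cons, List.drop_zero]
            by_cases hlt : b < x
            · rw [if_pos hlt]
            · rw [if_neg hlt]
              have hbx' : b = x := by omega
              subst hbx'
              exact (bIns_all_ge b t ha).symm
          · -- strictly more than capacity: head b is already discarded
            have h1 : (b :: t).length - n.toNat = (t.length - n.toNat) + 1 := by simp; omega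
            have h2 : (b :: t).length + 1 - n.toNat = (t.length + 1 - n.toNat) + 1 := by simp; omega
            rw [h1, h2, List.drop_succ_cons]
            simp only [bIns, if_pos hbx, List.drop_succ_cons]
            exact stepDrop n x hn t ht
        · -- x is below the head, hence below everything: kept suffix unchanged
          have hxb : x < b := by omega
          have h2 : (b :: t).length + 1 - n.toNat = ((b :: t).length - n.toNat) + 1 := by simp; omega
          simp only [bIns, if_neg hbx]
          rw [h2, List.drop_succ_cons]
          -- goal: bump (drop j (b::t)) x n = drop j (b::t), j = len+1-m ≥ 1? no: j = len - m
          set j := (b :: t).length - n.toNat with hj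
          have hjlt : j < (b :: t).length := by simp only [hj, List.length_cons]; omega
          have hlen : (List.drop j (b :: t)).length = (b :: t).length - j := by
            simp [List.length_drop]
          have hne : List.drop j (b :: t) ≠ [] := by
            rw [Ne, List.drop_eq_nil_iff]
            omega
          have hnotlt : ¬ (((List.drop j (b :: t)).length : Int) < n) := by
            rw [hlen]
            have hj' : (b :: t).length - j = n.toNat := by
              simp only [hj, List.length_cons]; omega
            rw [hj', hnn]; omega
          rcases hdec : List.drop j (b :: t) with _ | ⟨a, s⟩
          · exact absurd hdec hne
          · have hax : ¬ a < x := by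
              have hmem : a ∈ b :: t := List.mem_of_mem_drop (by rw [hdec]; simp)
              rcases List.mem_cons.mp hmem with rfl | hmem'
              · omega
              · have := ha a hmem'; omega
            rw [hdec] at hnotlt
            show (if ((a :: s).length : Int) < n then bIns x (a :: s)
              else if a < x then bIns x s else a :: s) = a :: s
            rw [if_neg hnotlt, if_neg hax]

theorem foldl_bump (n : Int) (hn : 0 ≤ n) (v : List Int) :
    v.foldl (fun t x => bump t x n) [] =
      (PySem.List.sorted v (fun s => s) false).drop (v.length - n.toNat) := by
  induction v using List.reverseRecOn with
  | nil => simp [PySem.List.sorted]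
  | append_singleton v x ih =>
    rw [List.foldl_append, List.foldl_cons, List.foldl_nil, ih]
    have hlen : v.length = (PySem.List.sorted v (fun s => s) false).length :=
      (PySem.List.length_sorted v _ _).symm
    rw [hlen, stepDrop n x hn _ (PySem.List.sorted_pairwise v (fun s => s)),
      ← sortA_append v x]
    congr 1
    · rw [PySem.List.length_sorted]
      simp

theorem sum_top (n : Int) (hn : 0 ≤ n) (v : List Int) :
    (PySem.List.slice (PySem.List.sorted v (fun s => s) true) none (some n)).sum =
      (v.foldl (fun t x => bump t x n) []).sum := by
  rw [PySem.List.slice_to _ hn, sortD_eq_reverse, List.take_reverse, List.sum_reverse,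
    foldl_bump n hn v, PySem.List.length_sorted]

theorem setdefault_modify (d : PySem.Dict String (List Int)) (k : String) (f : List Int → List Int) :
    (d.setdefault k []).modify k [] f = d.modify k [] f := by
  by_cases hc : d.contains k = true
  · rw [PySem.Dict.setdefault_of_contains d [] hc]
  · have hc' : d.contains k = false := by simpa using hc
    rw [PySem.Dict.setdefault_of_not_contains d [] hc']
    -- both sides append (k, f []) at the end
    simp only [PySem.Dict.modify]
    rw [PySem.Dict.getD_insert_self, PySem.Dict.getD_of_not_contains d [] hc',
      PySem.Dict.insert_insert_self]

theorem getD_foldl_bump (n : Int) (k : String) :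
    ∀ (l : List (String × Int)) (d : PySem.Dict String (List Int)),
      (l.foldl (fun d p => d.modify p.1 [] (fun t => bump t p.2 n)) d).getD k [] =
        ((l.filter (fun p => p.1 == k)).map (·.2)).foldl (fun t x => bump t x n) (d.getD k [])
  | [], d => by simp
  | p :: l, d => by
    rw [List.foldl_cons, getD_foldl_bump n k l, PySem.Dict.getD_modify]
    by_cases hpk : p.1 = k
    · rw [if_pos hpk.symm]
      simp [hpk]
    · rw [if_neg (Ne.symm hpk)]
      have hb : (p.1 == k) = false := by simpa using hpk
      simp [hb]

-- ===== VERDICT (by name: the statement is the Claim_ definition above) =====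
theorem highest_n_scores_spec : Claim_equal_highest_n_scores := by
  intro scores n _ hpre
  show highest_n_scores scores n = highest_n_scores_alt scores n
  simp only [highest_n_scores, highest_n_scores_alt]
  have hA : scores.foldl
      (fun d score => (d.setdefault score.1 []).modify score.1 [] (fun v => v ++ [score.2]))
      PySem.Dict.empty
      = scores.foldl (fun d p => d.modify p.1 [] (fun v => v ++ [p.2])) PySem.Dict.empty := by
    congr 1
    funext d sc
    exact setdefault_modify d sc.1 _
  have hB : scores.foldl (fun d p => d.insert p.1 (bump (d.getD p.1 []) p.2 n)) PySem.Dict.empty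
      = scores.foldl (fun d p => d.modify p.1 [] (fun t => bump t p.2 n)) PySem.Dict.empty := rfl
  rw [hA, hB, PySem.List.foldl_append_singleton_eq_map]
  set dA := scores.foldl (fun d p => d.modify p.1 [] (fun v => v ++ [p.2])) PySem.Dict.empty with hdA
  set dB := scores.foldl (fun d p => d.modify p.1 [] (fun t => bump t p.2 n)) PySem.Dict.empty with hdB
  have hndA : dA.keys.Nodup := by
    apply PySem.Dict.nodup_keys_foldl_modify_key scores (fun p => p.1) [] (fun _ p => fun v => v ++ [p.2])
    simp
  have hndB : dB.keys.Nodup := by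
    apply PySem.Dict.nodup_keys_foldl_modify_key scores (fun p => p.1) [] (fun _ p => fun t => bump t p.2 n)
    simp
  have hkeys : dA.keys = dB.keys := by
    rw [hdA, hdB,
      PySem.Dict.keys_foldl_modify_key scores (fun p => p.1) [] (fun _ p => fun v => v ++ [p.2]),
      PySem.Dict.keys_foldl_modify_key scores (fun p => p.1) [] (fun _ p => fun t => bump t p.2 n)]
  rw [PySem.Dict.items_eq_map_keys dA hndA [], PySem.Dict.items_eq_map_keys dB hndB [], hkeys,
    List.map_map, List.map_map]
  refine List.map_congr_left fun k _ => ?_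
  simp only [Function.comp_apply]
  have hgA : dA.getD k [] = (scores.filter (fun p => p.1 == k)).map (·.2) := by
    rw [hdA, PySem.Dict.getD_foldl_modify_append]
    simp
  have hgB : dB.getD k [] =
      ((scores.filter (fun p => p.1 == k)).map (·.2)).foldl (fun t x => bump t x n) [] := by
    rw [hdB, getD_foldl_bump]
    simp
  rw [hgA, hgB]
  exact Prod.ext rfl (sum_top n hpre _)
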